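-- pv_equiv track=rewrite | github.com/Alien-kh/SSAFY_with_me | kh_Jo/week_2/samsung_bus.py | solve
-- ===== SOURCE A (Python) =====
-- def solve(a_lst, b_lst, station_lst):
--     result_lst = []
--     for station in station_lst: # c번 버스정류장을 기준으로
--         count = 0 # 몇 개의 버스가 지나가는지
--         for a, b in zip(a_lst, b_lst): # i번째 기준으로 묶어줌
--             if a<= station <= b: # a[i] <= c <= b[i]
--                 count+=1 #버스가 지나간 수 세주기
--         result_lst.append(count)  # 각 정류장 마다 지나간 버스 수 반환
--     return result_lst
-- ===== SOURCE B (Python) =====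
-- def solve(a_lst, b_lst, station_lst):
--     # Pairs with a > b are empty intervals and never count; drop them so that
--     # count(s) = (#starts <= s) - (#ends < s) by inclusion-exclusion on sorted endpoints.
--     pairs = [(a, b) for a, b in zip(a_lst, b_lst) if a <= b]
--     starts = sorted(a for a, _ in pairs)
--     ends = sorted(b for _, b in pairs)
--
--     def bisect_right(xs, x):  # hand-inlined stdlib bisect.bisect_right (A imports no modules)
--         lo, hi = 0, len(xs)
--         while lo < hi:
--             mid = (lo + hi) // 2
--             if x < xs[mid]:
--                 hi = mid
--             else:
--                 lo = mid + 1
--         return lo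
--
--     def bisect_left(xs, x):  # hand-inlined stdlib bisect.bisect_left
--         lo, hi = 0, len(xs)
--         while lo < hi:
--             mid = (lo + hi) // 2
--             if xs[mid] < x:
--                 lo = mid + 1
--             else:
--                 hi = mid
--         return lo
--
--     return [bisect_right(starts, s) - bisect_left(ends, s) for s in station_lst]
-- ===== Notes on version B (the rewrite author's own statement) =====
-- stated objective: faster
-- what changed: Replaces the per-station scan over all intervals by sorting the (non-empty) interval start and end points once and answering each station with two binary searches: count = (#starts <= s) - (#ends < s).
import Mathlib
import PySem

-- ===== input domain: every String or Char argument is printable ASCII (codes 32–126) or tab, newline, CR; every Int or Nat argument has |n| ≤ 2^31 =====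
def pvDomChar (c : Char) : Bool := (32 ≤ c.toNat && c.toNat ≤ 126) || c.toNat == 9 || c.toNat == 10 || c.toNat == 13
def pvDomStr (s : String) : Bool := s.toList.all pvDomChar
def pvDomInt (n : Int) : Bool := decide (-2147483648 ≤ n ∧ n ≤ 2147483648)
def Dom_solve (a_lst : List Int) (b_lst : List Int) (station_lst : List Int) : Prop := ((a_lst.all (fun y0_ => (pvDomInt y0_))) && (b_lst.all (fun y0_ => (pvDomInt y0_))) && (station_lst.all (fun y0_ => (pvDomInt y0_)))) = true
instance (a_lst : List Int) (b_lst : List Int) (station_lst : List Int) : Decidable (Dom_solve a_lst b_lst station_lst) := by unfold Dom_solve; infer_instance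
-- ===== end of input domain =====

-- B replaces A's per-station scan over all intervals by sorting the (non-empty)
-- interval endpoints once and answering each station with two binary searches
-- (faster: O((N+S) log N) instead of O(S*N)).


-- ===== PORT A =====
def solve (a_lst : List Int) (b_lst : List Int) (station_lst : List Int) : List Int :=
  station_lst.foldl (fun result_lst station =>
    result_lst ++ [(a_lst.zip b_lst).foldl
      (fun count ab => if ab.1 ≤ station ∧ station ≤ ab.2 then count + 1 else count) (0 : Int)]) []

-- ===== PORT B =====
-- Source B's hand-inlined bisect loops are byte-for-byte stdlib bisect_right / bisect_left,
-- ported as the PySem primitives PySem.List.bisectRight / bisectLeft.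
def solve_alt (a_lst : List Int) (b_lst : List Int) (station_lst : List Int) : List Int :=
  let pairs := (a_lst.zip b_lst).filter (fun ab => decide (ab.1 ≤ ab.2))
  let starts := PySem.List.sorted (pairs.map (fun ab => ab.1)) (fun x => x) false
  let ends := PySem.List.sorted (pairs.map (fun ab => ab.2)) (fun x => x) false
  station_lst.map (fun s =>
    (PySem.List.bisectRight starts s : Int) - (PySem.List.bisectLeft ends s : Int))

-- ===== PRECONDITION & SPEC =====
def Spec_solve (a_lst : List Int) (b_lst : List Int) (station_lst : List Int) (out : List Int) : Prop := out = solve_alt a_lst b_lst station_lst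
instance (a_lst : List Int) (b_lst : List Int) (station_lst : List Int) (out : List Int) : Decidable (Spec_solve a_lst b_lst station_lst out) := by unfold Spec_solve; infer_instance

-- ===== CLAIM (what is proved, stated in full; the proofs are below) =====
def Claim_equal_solve : Prop := ∀ (a_lst : List Int) (b_lst : List Int) (station_lst : List Int), Dom_solve a_lst b_lst station_lst → Spec_solve a_lst b_lst station_lst (solve a_lst b_lst station_lst)

-- ===== LEMMAS AND PROOFS =====

-- If p holds exactly on the first r positions of xs, then countP p xs = r.
lemma countP_eq_of_prefix (xs : List Int) (p : Int → Bool) (r : Nat) (hr : r ≤ xs.length)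
    (h1 : ∀ (j : Nat) (hj : j < xs.length), j < r → p xs[j])
    (h2 : ∀ (j : Nat) (hj : j < xs.length), r ≤ j → p xs[j] = false) :
    xs.countP p = r := by
  induction xs generalizing r with
  | nil => simpa using (Nat.le_zero.mp (by simpa using hr)).symm
  | cons x t ih =>
    cases r with
    | zero =>
      simp only [List.countP_cons]
      have hx : p x = false := h2 0 (by simp) (Nat.zero_le _)
      have ht : t.countP p = 0 := by
        apply ih 0 (Nat.zero_le _)
        · intro j hj hj0; omega
        · intro j hj _
          exact h2 (j + 1) (by simpa using Nat.succ_lt_succ hj) (Nat.zero_le _)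
      simp [hx, ht]
    | succ r' =>
      have hx : p x = true := h1 0 (by simp) (Nat.succ_pos _)
      have ht : t.countP p = r' := by
        apply ih r' (by simpa using Nat.succ_le_succ_iff.mp hr)
        · intro j hj hjr
          exact h1 (j + 1) (by simpa using Nat.succ_lt_succ hj) (Nat.succ_lt_succ hjr)
        · intro j hj hjr
          exact h2 (j + 1) (by simpa using Nat.succ_lt_succ hj) (Nat.succ_le_succ hjr)
      simp [hx, ht]

-- On a sorted list, bisect_right counts the elements ≤ x.
lemma bisectRight_eq_countP (xs : List Int) (x : Int)
    (hs : xs.Pairwise (fun a b => a ≤ b)) :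
    PySem.List.bisectRight xs x = xs.countP (fun y => decide (y ≤ x)) := by
  obtain ⟨hle, h1, h2⟩ := PySem.List.bisectRight_spec xs x hs
  refine (countP_eq_of_prefix xs _ _ hle ?_ ?_).symm
  · intro j hj hjr; simpa using h1 j hj hjr
  · intro j hj hjr; simpa using not_le.mpr (h2 j hj hjr)

-- On a sorted list, bisect_left counts the elements < x.
lemma bisectLeft_eq_countP (xs : List Int) (x : Int)
    (hs : xs.Pairwise (fun a b => a ≤ b)) :
    PySem.List.bisectLeft xs x = xs.countP (fun y => decide (y < x)) := by
  obtain ⟨hle, h1, h2⟩ := PySem.List.bisectLeft_spec xs x hs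
  refine (countP_eq_of_prefix xs _ _ hle ?_ ?_).symm
  · intro j hj hjr; simpa using h1 j hj hjr
  · intro j hj hjr; simpa using not_lt.mpr (h2 j hj hjr)

-- Inclusion-exclusion over a list of non-empty intervals.
lemma countP_interval_split (l : List (Int × Int)) (s : Int)
    (h : ∀ ab ∈ l, ab.1 ≤ ab.2) :
    (l.countP (fun ab => decide (ab.1 ≤ s ∧ s ≤ ab.2)) : Int)
      = (l.countP (fun ab => decide (ab.1 ≤ s)) : Int)
        - (l.countP (fun ab => decide (ab.2 < s)) : Int) := by
  induction l with
  | nil => simp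
  | cons ab t ih =>
    have hab : ab.1 ≤ ab.2 := h ab (by simp)
    have ht := ih (fun x hx => h x (List.mem_cons_of_mem _ hx))
    simp only [Bool.decide_and] at ht
    simp only [List.countP_cons]
    by_cases h1 : ab.1 ≤ s ∧ s ≤ ab.2 <;> by_cases h2 : ab.1 ≤ s <;>
      by_cases h3 : ab.2 < s <;> simp [h1, h2, h3] <;> omega

-- Filtering out the empty intervals does not change the count.
lemma countP_filter_nonempty (l : List (Int × Int)) (s : Int) :
    (l.filter (fun ab => decide (ab.1 ≤ ab.2))).countP (fun ab => decide (ab.1 ≤ s ∧ s ≤ ab.2))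
      = l.countP (fun ab => decide (ab.1 ≤ s ∧ s ≤ ab.2)) := by
  rw [List.countP_filter]
  apply List.countP_congr
  intro ab _
  by_cases h : ab.1 ≤ s ∧ s ≤ ab.2 <;> simp [h]
  omega

-- ===== VERDICT (by name: the statement is the Claim_ definition above) =====
theorem solve_spec : Claim_equal_solve := by
  intro a_lst b_lst station_lst _
  unfold Spec_solve solve solve_alt
  rw [PySem.List.foldl_append_singleton_eq_map]
  simp only [List.nil_append]
  apply List.map_congr_left
  intro s _
  rw [PySem.List.foldl_ite_add_one]
  rw [bisectRight_eq_countP _ _ (PySem.List.sorted_pairwise _ _),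
      bisectLeft_eq_countP _ _ (PySem.List.sorted_pairwise _ _)]
  rw [(PySem.List.sorted_perm _ _ _).countP_eq, (PySem.List.sorted_perm _ _ _).countP_eq]
  rw [List.countP_map, List.countP_map]
  have hfl : ∀ ab ∈ (a_lst.zip b_lst).filter (fun ab => decide (ab.1 ≤ ab.2)), ab.1 ≤ ab.2 := by
    intro ab hab
    simpa using (List.of_mem_filter hab)
  rw [show ((a_lst.zip b_lst).filter (fun ab => decide (ab.1 ≤ ab.2))).countP
        ((fun y => decide (y ≤ s)) ∘ fun ab => ab.1)
      = ((a_lst.zip b_lst).filter (fun ab => decide (ab.1 ≤ ab.2))).countP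
        (fun ab => decide (ab.1 ≤ s)) from rfl,
      show ((a_lst.zip b_lst).filter (fun ab => decide (ab.1 ≤ ab.2))).countP
        ((fun y => decide (y < s)) ∘ fun ab => ab.2)
      = ((a_lst.zip b_lst).filter (fun ab => decide (ab.1 ≤ ab.2))).countP
        (fun ab => decide (ab.2 < s)) from rfl]
  rw [← countP_interval_split _ s hfl, countP_filter_nonempty]
  simp
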